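/-
  THE ARENA LAYER MEETS THE SHADOW LAYER: what the four allocator functions do to Q0's `ShadowInv others frames top mem`
  (Asan/Stack.lean), from `ArenaOK` (Vorbis/Arena.lean) and the memory `arena_unpoison` / `arena_poison` leave
  (`unpoisonMem` / `poisonMem` of Asan/Objects.lean: the postconditions of `arenaUnpoisonSpec` / `arenaPoisonSpec`, Asan/Runtime.lean).

      setup_malloc        ArenaOK.shadow_setup_malloc     + A.newSetupObj n      unpoisonMem mem2 (B + S + 32) n
      setup_temp_malloc   ArenaOK.shadow_temp_malloc      + A.newTempObj n       unpoisonMem mem2 (B + (T - (r8 n + 32))) n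
      setup_temp_free     ArenaOK.shadow_temp_free        − the top temp block   poisonMem mem2 (B + T) (r8 sz)
      arena_temp_restore  ArenaOK.shadow_temp_restore     − the blocks below p   poisonMem mem2 (B + T) (p - T)
      setup_temp_free, weak spec (`setup_temp_free(f, values, 0)`, successor SD.ERR)      poisonMem_zero: nothing is poisoned

  `mem2` is the memory at the call of the runtime routine (the allocator's store to `setup_offset` / `temp_offset` may have happened
  before it, as in `setup_temp_malloc`, or happen after it, as in `setup_temp_free`: `ShadowInv` does not care, a store to `*f` is
  `ShadowInv.untouched`). `ArenaOK` is used only for its GHOST clauses, so its own `mem` is any memory in which AR5 held.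

  Each lemma is `ShadowInv.unpoison` / `.poison` with every side condition discharged; together with the transition lemma of
  Vorbis/Arena.lean (`ArenaOK.setup_malloc` …) a worker of an allocator function gets both layers for the final state.
-/
import Asan.Stack
import Vorbis.Arena
namespace Vorbis
open X86 X86.User Asan

/-- `arena_poison(a, 0)` stores nothing (the weak spec of `setup_temp_free`: its one call has `sz = 0`). -/
theorem poisonMem_zero (mem : Mem) (a : Nat) : poisonMem mem a 0 = mem := id rfl

/-- `arena_unpoison(a, 0)` stores nothing (`setup_malloc(f, 0)`: an empty block, nothing accessible). -/
theorem unpoisonMem_zero (mem : Mem) (a : Nat) : unpoisonMem mem a 0 = mem := id rfl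

/-- **`arena_unpoison` writes shadow bytes only**: the data space reads the same (AR5 and every decoder clause survive it:
`ArenaFields.frame`, `Block.Same`). -/
theorem dataSame_unpoisonMem (mem : Mem) (a n : Nat) (h8 : a % 8 = 0) (hhi : a + n ≤ 0xC00000) :
    Mem.EqOn 0 0xC00000 mem (unpoisonMem mem a n) := by
  apply (unpoisonMem_sameExcept mem a n h8 hhi).eqOn
  intro w hw
  have e : w = shadowSpan a (a + n) := List.mem_singleton.mp hw
  subst e
  unfold shadowSpan
  simp only
  omega

/-- **`arena_poison` writes shadow bytes only.** -/
theorem dataSame_poisonMem (mem : Mem) (a n : Nat) (h8 : a % 8 = 0) (hhi : a + (n + 7) / 8 * 8 ≤ 0xC00000) :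
    Mem.EqOn 0 0xC00000 mem (poisonMem mem a n) := by
  apply (poisonMem_sameExcept mem a n h8 hhi).eqOn
  intro w hw
  have e : w = shadowSpan a (a + n) := List.mem_singleton.mp hw
  subst e
  unfold shadowSpan
  simp only
  omega

namespace ArenaOK
variable {A : Arena} {others : List Obj} {mem mem2 : Mem} {f : Nat} {frames : List (Nat × FrameLayout)} {top : Nat}

/-- **A setup block is live in `ShadowInv`'s live set** (`stackObjs frames ++ others`): the `hB` of `acc_of_obj`, with
`hsh.shadow.covers` as its `hc`. -/
theorem block_live_inv (h : ArenaOK A others mem f) (_ : ShadowInv others frames top mem2) {p n : Nat} (hb : A.Block p n) :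
    (Vorbis.Block.mk p n).live (Live (stackObjs frames ++ others)) :=
  h.block_live (fun _ ho => List.mem_append_right _ ho) hb

/-- A temp block is live in `ShadowInv`'s live set. -/
theorem tblock_live_inv (h : ArenaOK A others mem f) (_ : ShadowInv others frames top mem2) {p n : Nat} (hb : A.TBlock p n) :
    (Vorbis.Block.mk p n).live (Live (stackObjs frames ++ others)) :=
  h.tblock_live (fun _ ho => List.mem_append_right _ ho) hb

/-- **A check site inside a setup block, from the two layers**: `k` bytes at `a` inside `[p, p + n)`. -/
theorem block_acc_inv (h : ArenaOK A others mem f) (hsh : ShadowInv others frames top mem2) {p n : Nat} (hb : A.Block p n)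
    {a k : Nat} (h1 : p ≤ a) (h2 : a + k ≤ p + n) (hk : 1 ≤ k) : AccessibleSmall mem2 a k :=
  Vorbis.acc_of_obj hsh.shadow.covers (h.block_live_inv hsh hb) h1 h2 hk

/-- **A check site inside a temp block, from the two layers.** -/
theorem tblock_acc_inv (h : ArenaOK A others mem f) (hsh : ShadowInv others frames top mem2) {p n : Nat} (hb : A.TBlock p n)
    {a k : Nat} (h1 : p ≤ a) (h2 : a + k ≤ p + n) (hk : 1 ≤ k) : AccessibleSmall mem2 a k :=
  Vorbis.acc_of_obj hsh.shadow.covers (h.tblock_live_inv hsh hb) h1 h2 hk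

/-- **`setup_malloc`, the shadow half**: after `arena_unpoison(B + S + 32, n)` the new setup block is a live object. -/
theorem shadow_setup_malloc (h : ArenaOK A others mem f) (hsh : ShadowInv others frames top mem2) (n : Nat) (hfit : A.Fits n) :
    ShadowInv (A.newSetupObj n :: others) frames top (unpoisonMem mem2 (A.B + A.S + 32) n) := by
  obtain ⟨f1, f2, f3, f4⟩ := h.newSetup_facts n hfit
  have := hsh.unpoison (A.newSetupObj n) f1 f2 f3 f4 (h.newSetup_disj n hfit)
  rw [Nat.add_assoc]
  exact this

/-- **`setup_temp_malloc`, the shadow half**: after `arena_unpoison(B + T', n)`, `T' = T - (r8 n + 32)`, the new temp block is a live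
object. -/
theorem shadow_temp_malloc (h : ArenaOK A others mem f) (hsh : ShadowInv others frames top mem2) (n : Nat) (hfit : A.Fits n) :
    ShadowInv (A.newTempObj n :: others) frames top (unpoisonMem mem2 (A.B + (A.T - (r8 n + 32))) n) := by
  obtain ⟨f1, f2, f3, f4⟩ := h.newTemp_facts n hfit
  exact hsh.unpoison (A.newTempObj n) f1 f2 f3 f4 (h.newTemp_disj n hfit)

/-- **The shadow of a fresh setup block is EXACT** (I6 §4.1): full granules 0, a last partial granule holds `n % 8`, so the `r8 n - n`
padding bytes are not accessible. A remark about tightness: no proof needs it (`ShadowOK` keeps only "every byte of the object is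
accessible"). -/
theorem newSetup_exact (h : ArenaOK A others mem f) (n : Nat) (hfit : A.Fits n) :
    CoversObj (unpoisonMem mem2 (A.B + A.S + 32) n) (A.newSetupObj n) := by
  obtain ⟨f1, f2, f3, _⟩ := h.newSetup_facts n hfit
  have := coversObj_unpoisonMem mem2 (A.newSetupObj n) f1 f2 f3
  rw [Nat.add_assoc]
  exact this

/-- The shadow of a fresh temp block is exact. -/
theorem newTemp_exact (h : ArenaOK A others mem f) (n : Nat) (hfit : A.Fits n) :
    CoversObj (unpoisonMem mem2 (A.B + (A.T - (r8 n + 32))) n) (A.newTempObj n) := by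
  obtain ⟨f1, f2, f3, _⟩ := h.newTemp_facts n hfit
  exact coversObj_unpoisonMem mem2 (A.newTempObj n) f1 f2 f3

/-- **`arena_temp_restore(f, p)`, the shadow half**: after `arena_poison(B + T, p - T)` the blocks below the cut point `p` are gone,
every other live object is untouched. -/
theorem shadow_temp_restore (h : ArenaOK A others mem f) (hsh : ShadowInv others frames top mem2) {dead keep : List (Nat × Nat)}
    {p : Nat} (ht : A.temps = dead ++ keep) (hd : TempChain A.T dead p) :
    ShadowInv (dropObjs (dead.map A.tempObj) others) frames top (poisonMem mem2 (A.B + A.T) (p - A.T)) := by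
  have h1 := h.AR1
  have h4 := h.AR4
  rw [ht] at h4
  obtain ⟨p', hd', hk⟩ := TempChain.append_iff.mp h4
  have ep : p = p' := hd.end_unique hd'
  subst ep
  have hle1 := hd.le
  have hle2 := hk.le
  have hal := (hk.aligned h1.2.2.1).1
  have h2 := h.AR2
  have hn : A.T + (p - A.T + 7) / 8 * 8 ≤ p := by omega
  obtain ⟨f1, f2, f3, f4⟩ := h.drop_facts hle2 (p - A.T) hn
  exact hsh.poison (A.B + A.T) (p - A.T) f1 f2 f3 f4 (dropObjs_sublist _ _) (h.drop_out ht hd (p - A.T) (by omega))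

/-- **`setup_temp_free(f, B + T, sz)`, the shadow half** (LIFO contract: the top block `(t, m)`, `r8 sz = r8 m`): after
`arena_poison(B + T, r8 sz)` the top temp block is gone. (Its red zone was never unpoisoned and is not touched.) -/
theorem shadow_temp_free (h : ArenaOK A others mem f) (hsh : ShadowInv others frames top mem2) {t m : Nat}
    {rest : List (Nat × Nat)} (ht : A.temps = (t, m) :: rest) (sz : Nat) (hsz : r8 sz = r8 m) :
    ShadowInv (dropObjs [A.tempObj (t, m)] others) frames top (poisonMem mem2 (A.B + A.T) (r8 sz)) := by
  have htop := h.top_eq_T ht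
  have hr8 := r8_mod sz
  have hn : A.T + (r8 sz + 7) / 8 * 8 ≤ A.T + r8 sz + 32 := by omega
  obtain ⟨f1, f2, f3, f4⟩ := h.drop_facts (p := A.T + r8 sz + 32) (by omega) (r8 sz) hn
  have hd := h.top_chain ht sz hsz
  exact hsh.poison (A.B + A.T) (r8 sz) f1 f2 f3 f4 (dropObjs_sublist _ _)
    (h.drop_out (dead := [(t, m)]) (keep := rest) ht hd (r8 sz) (by omega))

end ArenaOK
end Vorbis
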